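-- pv_equiv track=rewrite | github.com/gostnort/FlightCheckPy | scripts/reformat_codes.py | remove_inner_blank_lines
-- ===== SOURCE A (Python) =====
-- from typing import List, Dict, Tuple
--
-- def remove_inner_blank_lines(lines: List[str]) -> List[str]:
--     """
--     Remove blank lines that are INSIDE indented blocks.
--     Keep blank lines that separate a block from the next top-level statement.
--     Rule: a blank line is removed only if BOTH the previous and next non-empty
--     lines are indented (> 0).
--     """
--     result: List[str] = []
--     n = len(lines)
--
--
--     def indent_of(idx: int) -> int:
--         raw = lines[idx]
--         return len(raw) - len(raw.lstrip(" \t"))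
--     # Precompute next non-empty line index for each position
--     next_non_empty: List[int] = [-1] * n
--     j = n - 1
--     last_seen = -1
--     while j >= 0:
--         if lines[j].strip() != "":
--             last_seen = j
--         next_non_empty[j] = last_seen
--         j -= 1
--     prev_non_empty_indent = 0
--     for i, line in enumerate(lines):
--         if line.strip() == "":
--             nxt = next_non_empty[i]
--             if nxt == -1:
--                 # trailing blanks – keep for now; will trim later
--                 result.append(line)
--                 continue
--             next_indent = indent_of(nxt)
--             if prev_non_empty_indent > 0 and next_indent > 0:
--                 # Inside a block → drop
--                 continue
--             # Otherwise, keep this top-level or boundary blank line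
--             result.append(line)
--             continue
--         # non-empty
--         prev_non_empty_indent = indent_of(i)
--         result.append(line)
--     return result
-- ===== SOURCE B (Python) =====
-- from typing import List
--
-- def remove_inner_blank_lines(lines: List[str]) -> List[str]:
--     """Single forward pass: buffer runs of blank lines; when the next non-empty
--     line arrives, drop the buffered run iff both surrounding indents are > 0,
--     otherwise keep it. Trailing blanks are flushed at the end."""
--     result: List[str] = []
--     pending: List[str] = []
--     prev_indent = 0
--     for line in lines:
--         if line.strip() == "":
--             pending.append(line)
--         else:
--             cur = len(line) - len(line.lstrip(" \t"))
--             if not (prev_indent > 0 and cur > 0):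
--                 result.extend(pending)
--             pending = []
--             result.append(line)
--             prev_indent = cur
--     result.extend(pending)
--     return result
-- ===== Notes on version B (the rewrite author's own statement) =====
-- stated objective: simpler
-- what changed: Replaced A's precomputed next-non-empty index array (backward pass) plus index lookups with a single forward pass that buffers runs of blank lines and flushes or drops the buffer when the next non-empty line (or the end) is reached.
import Mathlib
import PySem

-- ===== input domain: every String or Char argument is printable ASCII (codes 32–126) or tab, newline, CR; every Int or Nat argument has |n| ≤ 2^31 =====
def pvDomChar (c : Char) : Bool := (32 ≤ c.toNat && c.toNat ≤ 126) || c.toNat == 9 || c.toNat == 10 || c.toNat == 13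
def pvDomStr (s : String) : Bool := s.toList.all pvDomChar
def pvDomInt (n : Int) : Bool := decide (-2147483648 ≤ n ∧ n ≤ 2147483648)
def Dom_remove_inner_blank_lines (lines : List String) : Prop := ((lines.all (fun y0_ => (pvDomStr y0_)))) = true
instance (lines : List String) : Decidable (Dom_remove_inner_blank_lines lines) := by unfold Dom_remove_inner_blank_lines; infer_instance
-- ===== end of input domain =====

-- B replaces A's precomputed next-non-empty index array by a single forward pass
-- that buffers runs of blank lines (objective: simpler, one pass, no index arithmetic).

-- ===== PORT A =====
-- line.strip() == ""
def pvBlank (s : String) : Bool := PySem.Str.strip s == ""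

-- indent_of: len(raw) - len(raw.lstrip(" \t")); lstrip(" \t") ported by hand as
-- dropWhile over the chars " \t" (exact: removes exactly the leading chars among " \t")
def pvIndentOf (s : String) : Int :=
  (s.toList.length : Int) - ((s.toList.dropWhile (fun c => c == ' ' || c == '\t')).length : Int)

-- the backward while-loop building next_non_empty: value at position i is i if
-- lines[i] is non-blank, else the value at i+1 (−1 past the end)
def pvNextArr (i : Nat) : List String → List Int
  | [] => []
  | l :: rest =>
    let tail := pvNextArr (i + 1) rest
    let here : Int := if pvBlank l then (match tail with | [] => -1 | t :: _ => t) else (i : Int)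
    here :: tail

-- the main for-loop; lines is carried for the indent_of(nxt) lookup; the
-- next_non_empty[i] lookup is realised by zipping the enumeration with pvNextArr
def pvLoopA (lines : List String) : List ((Int × String) × Int) → Int → List String → List String
  | [], _, result => result
  | ((_, line), nxt) :: rest, prev, result =>
    if pvBlank line then
      if nxt = -1 then pvLoopA lines rest prev (result ++ [line])
      else
        match PySem.List.pyGet? lines nxt with
        | some raw =>
          if prev > 0 && pvIndentOf raw > 0 then pvLoopA lines rest prev result
          else pvLoopA lines rest prev (result ++ [line])
        | none => pvLoopA lines rest prev result  -- unreachable: nxt is a valid index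
    else pvLoopA lines rest (pvIndentOf line) (result ++ [line])

def remove_inner_blank_lines (lines : List String) : List String :=
  pvLoopA lines (List.zip (PySem.List.enumerate lines 0) (pvNextArr 0 lines)) 0 []

-- ===== PORT B =====
def pvLoopB : List String → Int → List String → List String → List String
  | [], _, result, pending => result ++ pending
  | line :: rest, prev, result, pending =>
    if pvBlank line then pvLoopB rest prev result (pending ++ [line])
    else
      let cur := pvIndentOf line
      let result' := (if prev > 0 && cur > 0 then result else result ++ pending) ++ [line]
      pvLoopB rest cur result' []

def remove_inner_blank_lines_alt (lines : List String) : List String :=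
  pvLoopB lines 0 [] []

-- ===== PRECONDITION & SPEC =====
def Spec_remove_inner_blank_lines (lines : List String) (out : List String) : Prop := out = remove_inner_blank_lines_alt lines
instance (lines : List String) (out : List String) : Decidable (Spec_remove_inner_blank_lines lines out) := by unfold Spec_remove_inner_blank_lines; infer_instance

-- ===== CLAIM (what is proved, stated in full; the proofs are below) =====
def Claim_equal_remove_inner_blank_lines : Prop := ∀ (lines : List String), Dom_remove_inner_blank_lines lines → Spec_remove_inner_blank_lines lines (remove_inner_blank_lines lines)

-- ===== LEMMAS AND PROOFS =====

-- first non-blank line of a list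
def pvNextNB (ls : List String) : Option String := ls.find? (fun l => !pvBlank l)

-- common reference recursion both ports are reduced to
def pvSpec : List String → Int → List String
  | [], _ => []
  | l :: rest, prev =>
    if pvBlank l then
      match pvNextNB rest with
      | none => l :: pvSpec rest prev
      | some r => if prev > 0 && pvIndentOf r > 0 then pvSpec rest prev else l :: pvSpec rest prev
    else l :: pvSpec rest (pvIndentOf l)

lemma pvLoopB_nil (prev : Int) (result pending : List String) :
    pvLoopB [] prev result pending = result ++ pending := rfl

lemma pvLoopB_cons (line : String) (rest : List String) (prev : Int) (result pending : List String) :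
    pvLoopB (line :: rest) prev result pending =
      if pvBlank line then pvLoopB rest prev result (pending ++ [line])
      else pvLoopB rest (pvIndentOf line)
        ((if prev > 0 && pvIndentOf line > 0 then result else result ++ pending) ++ [line]) [] := rfl

lemma pvNextArr_nil (i : Nat) : pvNextArr i [] = [] := rfl

lemma pvNextArr_cons (i : Nat) (l : String) (rest : List String) :
    pvNextArr i (l :: rest) =
      (if pvBlank l then (match pvNextArr (i + 1) rest with | [] => (-1 : Int) | t :: _ => t)
       else (i : Int)) :: pvNextArr (i + 1) rest := rfl

lemma pvLoopA_nil (lines : List String) (prev : Int) (result : List String) :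
    pvLoopA lines [] prev result = result := rfl

lemma pvLoopA_cons (lines : List String) (i : Int) (line : String) (nxt : Int)
    (rest : List ((Int × String) × Int)) (prev : Int) (result : List String) :
    pvLoopA lines (((i, line), nxt) :: rest) prev result =
      if pvBlank line then
        if nxt = -1 then pvLoopA lines rest prev (result ++ [line])
        else
          match PySem.List.pyGet? lines nxt with
          | some raw =>
            if prev > 0 && pvIndentOf raw > 0 then pvLoopA lines rest prev result
            else pvLoopA lines rest prev (result ++ [line])
          | none => pvLoopA lines rest prev result
      else pvLoopA lines rest (pvIndentOf line) (result ++ [line]) := rfl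

lemma pvLoopB_acc (ls : List String) : ∀ prev result pending,
    pvLoopB ls prev result pending = result ++ pvLoopB ls prev [] pending := by
  induction ls with
  | nil => intro prev result pending; simp [pvLoopB_nil]
  | cons l rest ih =>
    intro prev result pending
    rw [pvLoopB_cons, pvLoopB_cons]
    by_cases hb : pvBlank l
    · simp only [hb, if_true]; exact ih _ _ _
    · simp only [hb, Bool.false_eq_true, if_false]
      rw [ih (pvIndentOf l) ((if prev > 0 && pvIndentOf l > 0 then result else result ++ pending) ++ [l]) [],
          ih (pvIndentOf l) ((if prev > 0 && pvIndentOf l > 0 then ([] : List String) else [] ++ pending) ++ [l]) []]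
      by_cases hc : prev > 0 && pvIndentOf l > 0 <;> simp [hc]

lemma pvLoopB_spec (ls : List String) : ∀ prev pending,
    pvLoopB ls prev [] pending =
      (match pvNextNB ls with
       | none => pending
       | some r => if prev > 0 && pvIndentOf r > 0 then [] else pending) ++ pvSpec ls prev := by
  induction ls with
  | nil => intro prev pending; simp [pvLoopB_nil, pvNextNB, pvSpec]
  | cons l rest ih =>
    intro prev pending
    rw [pvLoopB_cons]
    by_cases hb : pvBlank l
    · have hnb : pvNextNB (l :: rest) = pvNextNB rest := by simp [pvNextNB, List.find?, hb]
      simp only [if_true, ih, hnb, pvSpec, hb]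
      cases h : pvNextNB rest with
      | none => simp
      | some r => by_cases hc : prev > 0 && pvIndentOf r > 0 <;> simp [hc]
    · have hnb : pvNextNB (l :: rest) = some l := by simp [pvNextNB, List.find?, hb]
      simp only [hb, Bool.false_eq_true, if_false, hnb]
      rw [pvLoopB_acc, ih]
      simp only [pvSpec, hb, Bool.false_eq_true, if_false]
      cases h : pvNextNB rest with
      | none => by_cases hc : prev > 0 && pvIndentOf l > 0 <;> simp [hc]
      | some r => by_cases hc : prev > 0 && pvIndentOf l > 0 <;> simp [hc]

-- head of the next_non_empty array: −1 if no non-blank remains, else a valid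
-- global index whose line is the first non-blank of the suffix
lemma pvNextArr_head (lines : List String) : ∀ (rest : List String) (i : Nat),
    lines.drop i = rest →
    (match pvNextNB rest with
     | none => (pvNextArr i rest).headD (-1) = -1
     | some r => ∃ k : Nat, (pvNextArr i rest).headD (-1) = (k : Int) ∧
         PySem.List.pyGet? lines (k : Int) = some r) := by
  intro rest
  induction rest with
  | nil => intro i _; simp [pvNextNB, pvNextArr_nil]
  | cons l rest' ih =>
    intro i h
    have h' : lines.drop (i + 1) = rest' := by
      have := congrArg (List.drop 1) h
      simpa [List.drop_drop, Nat.add_comm] using this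
    by_cases hb : pvBlank l
    · have hnb : pvNextNB (l :: rest') = pvNextNB rest' := by simp [pvNextNB, List.find?, hb]
      have H := ih (i + 1) h'
      rw [pvNextArr_cons]
      simp only [hnb, hb, if_true]
      cases hn : pvNextNB rest' with
      | none =>
        simp only [hn] at H
        cases ha : pvNextArr (i + 1) rest' with
        | nil => simp
        | cons t ts => simp only [ha, List.headD_cons] at H ⊢; simpa using H
      | some r =>
        simp only [hn] at H
        obtain ⟨k, hk1, hk2⟩ := H
        refine ⟨k, ?_, hk2⟩
        cases ha : pvNextArr (i + 1) rest' with
        | nil => simp only [ha, List.headD_nil] at hk1; omega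
        | cons t ts => simp only [ha, List.headD_cons] at hk1 ⊢; simpa using hk1
    · have hnb : pvNextNB (l :: rest') = some l := by simp [pvNextNB, List.find?, hb]
      rw [pvNextArr_cons]
      simp only [hnb, hb, Bool.false_eq_true, if_false, List.headD_cons]
      refine ⟨i, rfl, ?_⟩
      have : lines[i]? = some l := by
        have := congrArg List.head? h
        simpa [List.head?_drop] using this
      simpa [PySem.List.pyGet?_natCast] using this

lemma pvLoopA_acc (lines : List String) :
    ∀ (z : List ((Int × String) × Int)) prev result,
    pvLoopA lines z prev result = result ++ pvLoopA lines z prev [] := by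
  intro z
  induction z with
  | nil => intro prev result; simp [pvLoopA_nil]
  | cons p rest ih =>
    intro prev result
    obtain ⟨⟨i, line⟩, nxt⟩ := p
    rw [pvLoopA_cons, pvLoopA_cons]
    by_cases hb : pvBlank line
    · by_cases hn : nxt = -1
      · simp only [hb, if_true, hn]
        rw [ih prev (result ++ [line]), ih prev ([] ++ [line])]
        simp
      · simp only [hb, if_true, hn, if_false]
        cases hg : PySem.List.pyGet? lines nxt with
        | none => exact ih _ _
        | some raw =>
          by_cases hc : prev > 0 && pvIndentOf raw > 0
          · simp only [hc, if_true]; exact ih _ _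
          · simp only [hc, Bool.false_eq_true, if_false]
            rw [ih prev (result ++ [line]), ih prev ([] ++ [line])]
            simp
    · simp only [hb, Bool.false_eq_true, if_false]
      rw [ih (pvIndentOf line) (result ++ [line]), ih (pvIndentOf line) ([] ++ [line])]
      simp

lemma pvLoopA_spec (lines : List String) : ∀ (rest : List String) (i : Nat) (prev : Int),
    lines.drop i = rest →
    pvLoopA lines (List.zip (PySem.List.enumerate rest (i : Int)) (pvNextArr i rest)) prev []
      = pvSpec rest prev := by
  intro rest
  induction rest with
  | nil => intro i prev _; simp [pvLoopA_nil, pvSpec, PySem.List.enumerate, pvNextArr_nil]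
  | cons l rest' ih =>
    intro i prev h
    have h' : lines.drop (i + 1) = rest' := by
      have := congrArg (List.drop 1) h
      simpa [List.drop_drop, Nat.add_comm] using this
    have hrec' : ∀ p, pvLoopA lines (List.zip (PySem.List.enumerate rest' ((i : Int) + 1)) (pvNextArr (i + 1) rest')) p []
        = pvSpec rest' p := by
      intro p
      have := ih (i + 1) p h'
      simpa [Nat.cast_add] using this
    rw [pvNextArr_cons, PySem.List.enumerate_cons, List.zip_cons_cons, pvLoopA_cons]
    by_cases hb : pvBlank l
    · have H := pvNextArr_head lines rest' (i + 1) h'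
      simp only [hb, if_true, pvSpec]
      cases hn : pvNextNB rest' with
      | none =>
        simp only [hn] at H
        have hhd : (match pvNextArr (i + 1) rest' with | [] => (-1 : Int) | t :: _ => t) = -1 := by
          cases ha : pvNextArr (i + 1) rest' with
          | nil => rfl
          | cons t ts => simp only [ha, List.headD_cons] at H; simpa using H
        rw [hhd]
        simp only [reduceIte]
        rw [pvLoopA_acc, hrec' prev]
        simp
      | some r =>
        simp only [hn] at H
        obtain ⟨k, hk1, hk2⟩ := H
        have hhd : (match pvNextArr (i + 1) rest' with | [] => (-1 : Int) | t :: _ => t) = (k : Int) := by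
          cases ha : pvNextArr (i + 1) rest' with
          | nil => simp only [ha, List.headD_nil] at hk1; omega
          | cons t ts => simp only [ha, List.headD_cons] at hk1; simpa using hk1
        rw [hhd]
        have hne : (k : Int) ≠ -1 := by omega
        simp only [hne, if_false, hk2]
        by_cases hc : prev > 0 && pvIndentOf r > 0
        · simp only [hc, if_true]
          exact hrec' prev
        · simp only [hc, Bool.false_eq_true, if_false]
          rw [pvLoopA_acc, hrec' prev]
          simp
    · simp only [hb, Bool.false_eq_true, if_false, pvSpec]
      rw [pvLoopA_acc, hrec' (pvIndentOf l)]
      simp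

-- ===== VERDICT (by name: the statement is the Claim_ definition above) =====
theorem remove_inner_blank_lines_spec : Claim_equal_remove_inner_blank_lines := by
  intro lines _
  unfold Spec_remove_inner_blank_lines remove_inner_blank_lines remove_inner_blank_lines_alt
  have hA := pvLoopA_spec lines lines 0 0 (by simp)
  have hB := pvLoopB_spec lines 0 []
  rw [Nat.cast_zero] at hA
  rw [hA, hB]
  cases h : pvNextNB lines with
  | none => simp
  | some r => by_cases hc : (0 : Int) > 0 && pvIndentOf r > 0 <;> simp_all
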